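-- pv_equiv track=rewrite | github.com/swarley72/algorithms | graphs/1971_find_if_path_exists_in_graph.py | valid_path_stack
-- ===== SOURCE A (Python) =====
-- from collections import defaultdict, deque
--
-- def valid_path_stack(n: int, edges: list[list[int]], source: int, destination: int) -> bool:
--     graph = defaultdict(list)
--
--     for a, b in edges:
--         graph[a].append(b)
--         graph[b].append(a)
--
--     visited = set()
--     visited.add(source)
--
--     stack = [source]
--     while stack:
--         v = stack.pop()
--
--         if v == destination:
--             return True
--
--         for ngh in graph[v]:
--             if ngh not in visited:
--                 visited.add(ngh)
--                 stack.append(ngh)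
--
--     return False
-- ===== SOURCE B (Python) =====
-- def valid_path_stack(n: int, edges: list[list[int]], source: int, destination: int) -> bool:
--     # Edge-relaxation fixpoint: grow the set reachable from source by sweeping
--     # the edge list until it stops changing (at most 2*len(edges)+1 sweeps needed).
--     reach = {source}
--     for _ in range(2 * len(edges) + 1):
--         before = len(reach)
--         for a, b in edges:
--             if a in reach or b in reach:
--                 reach.add(a)
--                 reach.add(b)
--         if len(reach) == before:
--             break
--     return destination in reach
-- ===== Notes on version B (the rewrite author's own statement) =====
-- stated objective: alternative
-- what changed: Replaces A's adjacency-dict construction plus explicit-stack DFS with a stack-free edge-relaxation fixpoint: the set reachable from source is grown by repeated monotone sweeps over the raw edge list until it stabilises, then destination is tested for membership.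
import Mathlib
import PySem

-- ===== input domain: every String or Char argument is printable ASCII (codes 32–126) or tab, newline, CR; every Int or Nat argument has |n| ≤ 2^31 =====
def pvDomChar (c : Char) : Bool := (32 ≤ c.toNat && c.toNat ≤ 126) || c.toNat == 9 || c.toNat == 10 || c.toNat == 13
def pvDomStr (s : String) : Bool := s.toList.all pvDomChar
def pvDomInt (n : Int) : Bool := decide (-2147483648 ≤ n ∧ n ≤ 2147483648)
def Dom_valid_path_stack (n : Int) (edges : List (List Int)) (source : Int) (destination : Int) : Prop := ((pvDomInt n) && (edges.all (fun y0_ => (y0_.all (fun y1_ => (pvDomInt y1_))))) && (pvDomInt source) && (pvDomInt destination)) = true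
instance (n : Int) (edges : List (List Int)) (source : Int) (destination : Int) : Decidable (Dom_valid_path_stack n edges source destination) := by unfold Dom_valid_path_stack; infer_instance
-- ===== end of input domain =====

-- B replaces A's adjacency-dict + explicit-stack DFS by an edge-relaxation fixpoint over the raw
-- edge list (objective: alternative algorithm; no speed claim). Neither program mutates its arguments.

-- ===== PORT A =====
-- graph = defaultdict(list); for a, b in edges: graph[a].append(b); graph[b].append(a)
def dfsGraph (edges : List (List Int)) : PySem.Dict Int (List Int) :=
  edges.foldl (fun g e =>
    match e with
    | [a, b] => (g.modify a [] (· ++ [b])).modify b [] (· ++ [a])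
    | _ => g) -- Python raises ValueError (unpacking) on a non-2-element edge; excluded by Pre_
    PySem.Dict.empty

-- the body of 'for ngh in graph[v]: if ngh not in visited: visited.add(ngh); stack.append(ngh)'
def dfsPush (p : PySem.Set Int × List Int) (ngh : Int) : PySem.Set Int × List Int :=
  if PySem.Set.contains p.1 ngh then p else (PySem.Set.add p.1 ngh, p.2 ++ [ngh])

-- all neighbour-list entries of the dict (used only in the termination measure of the while loop)
def dfsUniv (g : PySem.Dict Int (List Int)) : List Int := g.values.flatten

lemma mem_dfsUniv (g : PySem.Dict Int (List Int)) (k x : Int)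
    (h : x ∈ g.getD k ([] : List Int)) : x ∈ dfsUniv g := by
  rcases hq : g.get? k with _ | v
  · rw [PySem.Dict.getD_of_get?_eq_none _ _ hq] at h; cases h
  · rw [PySem.Dict.getD_of_get?_eq_some _ _ hq] at h
    have hin : (k, v) ∈ g.items := PySem.Dict.mem_items_of_get?_eq_some _ hq
    have hv : v ∈ g.values := by
      simp only [PySem.Dict.values]
      exact List.mem_map.mpr ⟨(k, v), hin, rfl⟩
    exact List.mem_flatten.mpr ⟨v, hv, h⟩

lemma not_contains_iff (s : PySem.Set Int) (x : Int) :
    ((!PySem.Set.contains s x) = true) ↔ x ∉ s := by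
  rw [Bool.not_eq_true', Bool.eq_false_iff, Ne, PySem.Set.contains_iff]

lemma filter_length_add (U : List Int) (visited : PySem.Set Int) (nn : Int)
    (hnU : nn ∈ U) (hc : nn ∉ visited) :
    (U.filter (fun x => !PySem.Set.contains (PySem.Set.add visited nn) x)).length + 1
      ≤ (U.filter (fun x => !PySem.Set.contains visited x)).length := by
  have himp : ∀ x : Int, ((!PySem.Set.contains (PySem.Set.add visited nn) x) = true) →
      ((!PySem.Set.contains visited x) = true) := by
    intro x hx
    rw [not_contains_iff] at hx ⊢
    intro hxv; exact hx ((PySem.Set.mem_add _ _ _).mpr (Or.inl hxv))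
  induction U with
  | nil => cases hnU
  | cons u rest ih =>
    have hmono' := (List.monotone_filter_right rest himp).length_le
    rcases List.mem_cons.mp hnU with rfl | hmem
    · have hold : (!PySem.Set.contains visited nn) = true := (not_contains_iff _ _).mpr hc
      have hnew : (!PySem.Set.contains (PySem.Set.add visited nn) nn) = false := by
        have hm : nn ∈ PySem.Set.add visited nn := (PySem.Set.mem_add _ _ _).mpr (Or.inr rfl)
        rw [← PySem.Set.contains_iff] at hm
        simp [hm]
      simp only [List.filter_cons, hold, hnew, if_true, Bool.false_eq_true, if_false,
        List.length_cons]
      omega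
    · have hih := ih hmem
      cases hnu : (!PySem.Set.contains (PySem.Set.add visited nn) u) with
      | true =>
        have holdu := himp u hnu
        simp only [List.filter_cons, hnu, holdu, if_true, List.length_cons]
        omega
      | false =>
        simp only [List.filter_cons, hnu, Bool.false_eq_true, if_false]
        cases holdu : (!PySem.Set.contains visited u) <;>
          simp only [holdu, if_true, Bool.false_eq_true, if_false, List.length_cons] <;> omega

lemma dfsFold_measure (U : List Int) (nghs : List Int) (visited : PySem.Set Int)
    (stack : List Int) (h : ∀ x ∈ nghs, x ∈ U) :
    2 * ((U.filter (fun x => !PySem.Set.contains (nghs.foldl dfsPush (visited, stack)).1 x)).length)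
        + (nghs.foldl dfsPush (visited, stack)).2.length
      ≤ 2 * (U.filter (fun x => !PySem.Set.contains visited x)).length + stack.length := by
  induction nghs generalizing visited stack with
  | nil => simp
  | cons nn ns ih =>
    simp only [List.foldl_cons]
    cases hc : PySem.Set.contains visited nn with
    | true =>
      have hstep : dfsPush (visited, stack) nn = (visited, stack) := by
        simp only [dfsPush]; rw [if_pos hc]
      rw [hstep]
      exact ih _ _ (fun x hx => h x (List.mem_cons_of_mem _ hx))
    | false =>
      have hstep : dfsPush (visited, stack) nn = (PySem.Set.add visited nn, stack ++ [nn]) := by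
        simp only [dfsPush]; rw [if_neg (by rw [hc]; simp)]
      rw [hstep]
      have hnv : nn ∉ visited := by
        intro hm; rw [← PySem.Set.contains_iff] at hm; rw [hc] at hm; cases hm
      have hdec := filter_length_add U visited nn (h nn List.mem_cons_self) hnv
      have hrec := ih (PySem.Set.add visited nn) (stack ++ [nn])
        (fun x hx => h x (List.mem_cons_of_mem _ hx))
      simp only [List.length_append, List.length_cons, List.length_nil] at hrec ⊢
      omega

-- while stack: v = stack.pop(); if v == destination: return True; for ngh in graph[v]: …
def dfsLoop (graph : PySem.Dict Int (List Int)) (destination : Int)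
    (visited : PySem.Set Int) (stack : List Int) : Bool :=
  match stack with
  | [] => false
  | s₀ :: s' =>
    -- v = stack.pop() takes the LAST element; the rest of the stack is dropLast
    if (s₀ :: s').getLast (by simp) = destination then true
    else
      dfsLoop graph destination
        (((graph.getD ((s₀ :: s').getLast (by simp)) ([] : List Int)).foldl dfsPush
          (visited, (s₀ :: s').dropLast)).1)
        (((graph.getD ((s₀ :: s').getLast (by simp)) ([] : List Int)).foldl dfsPush
          (visited, (s₀ :: s').dropLast)).2)
termination_by 2 * ((dfsUniv graph).filter (fun x => !PySem.Set.contains visited x)).length + stack.length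
decreasing_by
  have hmem : ∀ x ∈ graph.getD ((s₀ :: s').getLast (by simp)) ([] : List Int), x ∈ dfsUniv graph :=
    fun x hx => mem_dfsUniv graph _ x hx
  have hfold := dfsFold_measure (dfsUniv graph)
    (graph.getD ((s₀ :: s').getLast (by simp)) ([] : List Int))
    visited ((s₀ :: s').dropLast) hmem
  have hlen : (s₀ :: s').dropLast.length = s'.length := by simp
  simp only [List.length_cons]
  omega

def valid_path_stack (n : Int) (edges : List (List Int)) (source : Int) (destination : Int) : Bool :=
  dfsLoop (dfsGraph edges) destination
    (PySem.Set.add PySem.Set.empty source)   -- visited = set(); visited.add(source)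
    [source]                                 -- stack = [source]

-- ===== PORT B =====
-- one edge inspection: if a in reach or b in reach: reach.add(a); reach.add(b)
def altStep (r : PySem.Set Int) (e : List Int) : PySem.Set Int :=
  match e with
  | [a, b] =>
    if PySem.Set.contains r a || PySem.Set.contains r b
    then PySem.Set.add (PySem.Set.add r a) b else r
  | _ => r -- Python raises ValueError (unpacking) on a non-2-element edge; excluded by Pre_

-- one sweep 'for a, b in edges: …'
def altPass (edges : List (List Int)) (r : PySem.Set Int) : PySem.Set Int :=
  edges.foldl altStep r

-- 'for _ in range(2*len(edges)+1): before = len(reach); <sweep>; if len(reach) == before: break'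
def altLoop (edges : List (List Int)) : Nat → PySem.Set Int → PySem.Set Int
  | 0, reach => reach
  | Nat.succ k, reach =>
    if (altPass edges reach).length = reach.length then altPass edges reach
    else altLoop edges k (altPass edges reach)

def valid_path_stack_alt (n : Int) (edges : List (List Int)) (source : Int) (destination : Int) : Bool :=
  PySem.Set.contains (altLoop edges (2 * edges.length + 1) (PySem.Set.ofList [source])) destination

-- ===== PRECONDITION & SPEC =====
-- Pre_ excludes exactly the inputs on which Python A raises: any edge that is not a 2-element
-- list makes 'for a, b in edges' raise ValueError (B raises there too).
def Pre_valid_path_stack (n : Int) (edges : List (List Int)) (source : Int) (destination : Int) : Prop :=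
  ∀ e ∈ edges, e.length = 2
instance (n : Int) (edges : List (List Int)) (source : Int) (destination : Int) : Decidable (Pre_valid_path_stack n edges source destination) := by unfold Pre_valid_path_stack; infer_instance

def pvWitness_valid_path_stack : Int × List (List Int) × Int × Int := (4, [[0, 1], [1, 2]], 0, 2)

def Spec_valid_path_stack (n : Int) (edges : List (List Int)) (source : Int) (destination : Int) (out : Bool) : Prop := out = valid_path_stack_alt n edges source destination
instance (n : Int) (edges : List (List Int)) (source : Int) (destination : Int) (out : Bool) : Decidable (Spec_valid_path_stack n edges source destination out) := by unfold Spec_valid_path_stack; infer_instance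

-- ===== CLAIM (what is proved, stated in full; the proofs are below) =====
def Claim_equal_valid_path_stack : Prop := ∀ (n : Int) (edges : List (List Int)) (source : Int) (destination : Int), Dom_valid_path_stack n edges source destination → Pre_valid_path_stack n edges source destination → Spec_valid_path_stack n edges source destination (valid_path_stack n edges source destination)

-- ===== LEMMAS AND PROOFS =====

-- the undirected adjacency relation described by the edge list
def Adj (edges : List (List Int)) (x y : Int) : Prop := ∃ e ∈ edges, e = [x, y] ∨ e = [y, x]

-- ---------- A side: the DFS returns true iff destination is reachable ----------

lemma adj_cons_pair (a b : Int) (es : List (List Int)) (x y : Int) :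
    Adj ([a, b] :: es) x y ↔ ((x = a ∧ y = b) ∨ (x = b ∧ y = a)) ∨ Adj es x y := by
  simp only [Adj, List.mem_cons]
  constructor
  · rintro ⟨e, (rfl | he), h⟩
    · rcases h with h | h <;> (injection h with h1 h2; injection h2 with h2 _) <;> tauto
    · exact Or.inr ⟨e, he, h⟩
  · rintro ((⟨rfl, rfl⟩ | ⟨rfl, rfl⟩) | ⟨e, he, h⟩)
    · exact ⟨[x, y], Or.inl rfl, Or.inl rfl⟩
    · exact ⟨[y, x], Or.inl rfl, Or.inr rfl⟩
    · exact ⟨e, Or.inr he, h⟩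

lemma adj_cons_ne (e : List Int) (es : List (List Int)) (x y : Int) (h2 : e.length ≠ 2) :
    Adj (e :: es) x y ↔ Adj es x y := by
  simp only [Adj, List.mem_cons]
  constructor
  · rintro ⟨e', (rfl | he), h⟩
    · rcases h with rfl | rfl <;> simp at h2
    · exact ⟨e', he, h⟩
  · rintro ⟨e', he, h⟩; exact ⟨e', Or.inr he, h⟩

lemma mem_getD_dfsGraph_aux (edges : List (List Int)) (g : PySem.Dict Int (List Int)) (x y : Int) :
    (y ∈ (edges.foldl (fun g e =>
      match e with
      | [a, b] => (g.modify a [] (· ++ [b])).modify b [] (· ++ [a])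
      | _ => g) g).getD x ([] : List Int)) ↔ y ∈ g.getD x ([] : List Int) ∨ Adj edges x y := by
  induction edges generalizing g with
  | nil => simp [Adj]
  | cons e es ih =>
    rw [List.foldl_cons, ih]
    match e with
    | [a, b] =>
      rw [adj_cons_pair]
      have h2 : ((g.modify a [] (· ++ [b])).modify b [] (· ++ [a])).getD x ([] : List Int)
          = if x = b then ((g.modify a [] (· ++ [b])).getD b ([] : List Int)) ++ [a]
            else (g.modify a [] (· ++ [b])).getD x ([] : List Int) := by
        rw [PySem.Dict.getD_modify]
      have h1 : ∀ z : Int, (g.modify a [] (· ++ [b])).getD z ([] : List Int)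
          = if z = a then (g.getD a ([] : List Int)) ++ [b] else g.getD z ([] : List Int) := by
        intro z; rw [PySem.Dict.getD_modify]
      rw [h2]
      by_cases hxb : x = b <;> by_cases hxa : x = a <;>
        subst_vars <;> simp_all [h1, List.mem_append] <;> tauto
    | [] => rw [adj_cons_ne _ _ _ _ (by simp)]
    | [a] => rw [adj_cons_ne _ _ _ _ (by simp)]
    | a :: b :: c :: rest => rw [adj_cons_ne _ _ _ _ (by simp)]

lemma mem_getD_dfsGraph (edges : List (List Int)) (x y : Int) :
    (y ∈ (dfsGraph edges).getD x ([] : List Int)) ↔ Adj edges x y := by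
  unfold dfsGraph
  rw [mem_getD_dfsGraph_aux]
  rw [PySem.Dict.getD_of_get?_eq_none _ _ (by simp [PySem.Dict.get?_empty])]
  simp

lemma dfsPush_fold_props (nghs : List Int) (visited : PySem.Set Int) (stack : List Int) :
    (∀ x ∈ visited, x ∈ (nghs.foldl dfsPush (visited, stack)).1) ∧
    (∀ x ∈ stack, x ∈ (nghs.foldl dfsPush (visited, stack)).2) ∧
    (∀ x ∈ nghs, x ∈ (nghs.foldl dfsPush (visited, stack)).1) ∧
    (∀ x ∈ (nghs.foldl dfsPush (visited, stack)).1, x ∈ visited ∨ x ∈ nghs) ∧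
    (∀ x ∈ (nghs.foldl dfsPush (visited, stack)).1, x ∈ visited ∨ x ∈ (nghs.foldl dfsPush (visited, stack)).2) ∧
    (∀ x ∈ (nghs.foldl dfsPush (visited, stack)).2, x ∈ stack ∨ x ∈ (nghs.foldl dfsPush (visited, stack)).1) := by
  induction nghs generalizing visited stack with
  | nil => exact ⟨fun x hx => hx, fun x hx => hx, fun x hx => (List.not_mem_nil hx).elim,
      fun x hx => Or.inl hx, fun x hx => Or.inl hx, fun x hx => Or.inl hx⟩
  | cons nn ns ih =>
    simp only [List.foldl_cons]
    cases hc : PySem.Set.contains visited nn with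
    | true =>
      have hstep : dfsPush (visited, stack) nn = (visited, stack) := by
        simp only [dfsPush]; rw [if_pos hc]
      rw [hstep]
      obtain ⟨i1, i2, i3, i4, i5, i6⟩ := ih visited stack
      have hnv : nn ∈ visited := (PySem.Set.contains_iff _ _).mp hc
      refine ⟨i1, i2, ?_, ?_, i5, i6⟩
      · intro x hx
        rcases List.mem_cons.mp hx with rfl | hx'
        · exact i1 _ hnv
        · exact i3 _ hx'
      · intro x hx
        rcases i4 x hx with h | h
        · exact Or.inl h
        · exact Or.inr (List.mem_cons_of_mem _ h)
    | false =>
      have hstep : dfsPush (visited, stack) nn = (PySem.Set.add visited nn, stack ++ [nn]) := by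
        simp only [dfsPush]; rw [if_neg (by rw [hc]; simp)]
      rw [hstep]
      obtain ⟨i1, i2, i3, i4, i5, i6⟩ := ih (PySem.Set.add visited nn) (stack ++ [nn])
      have hmemadd : ∀ x, x ∈ PySem.Set.add visited nn ↔ x ∈ visited ∨ x = nn :=
        fun x => PySem.Set.mem_add _ _ _
      refine ⟨?_, ?_, ?_, ?_, ?_, ?_⟩
      · intro x hx; exact i1 _ ((hmemadd x).mpr (Or.inl hx))
      · intro x hx; exact i2 _ (List.mem_append.mpr (Or.inl hx))
      · intro x hx
        rcases List.mem_cons.mp hx with rfl | hx'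
        · exact i1 _ ((hmemadd x).mpr (Or.inr rfl))
        · exact i3 _ hx'
      · intro x hx
        rcases i4 x hx with h | h
        · rcases (hmemadd x).mp h with h' | rfl
          · exact Or.inl h'
          · exact Or.inr List.mem_cons_self
        · exact Or.inr (List.mem_cons_of_mem _ h)
      · intro x hx
        rcases i5 x hx with h | h
        · rcases (hmemadd x).mp h with h' | rfl
          · exact Or.inl h'
          · exact Or.inr (i2 _ (List.mem_append.mpr (Or.inr List.mem_cons_self)))
        · exact Or.inr h
      · intro x hx
        rcases i6 x hx with h | h
        · rcases List.mem_append.mp h with h' | h'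
          · exact Or.inl h'
          · rcases List.mem_cons.mp h' with rfl | h''
            · exact Or.inr (i1 _ ((hmemadd x).mpr (Or.inr rfl)))
            · exact (List.not_mem_nil h'').elim
        · exact Or.inr h

lemma dfsLoop_iff (graph : PySem.Dict Int (List Int)) (destination : Int)
    (visited : PySem.Set Int) (stack : List Int) (src : Int) :
    (∀ x ∈ stack, x ∈ visited) → src ∈ visited →
    (∀ x ∈ visited, Relation.ReflTransGen (fun a b => b ∈ graph.getD a ([] : List Int)) src x) →
    (∀ x ∈ visited, x ∉ stack → ∀ y, y ∈ graph.getD x ([] : List Int) → y ∈ visited) →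
    (destination ∈ visited → destination ∈ stack) →
    (dfsLoop graph destination visited stack = true ↔
      Relation.ReflTransGen (fun a b => b ∈ graph.getD a ([] : List Int)) src destination) := by
  fun_induction dfsLoop graph destination visited stack with
  | case1 visited =>
    intro hs hsrc hv hcl hdest
    simp only [Bool.false_eq_true, false_iff]
    intro hr
    have hall : ∀ x, Relation.ReflTransGen (fun a b => b ∈ graph.getD a ([] : List Int)) src x →
        x ∈ visited := by
      intro x hx
      induction hx with
      | refl => exact hsrc
      | tail _ hbc ihx => exact hcl _ ihx (List.not_mem_nil) _ hbc
    exact List.not_mem_nil (hdest (hall _ hr))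
  | case2 visited s₀ s' heq =>
    intro hs hsrc hv hcl hdest
    constructor
    · intro _
      rw [← heq]
      exact hv _ (hs _ (List.getLast_mem _))
    · intro _
      rfl
  | case3 visited s₀ s' hne ih =>
    intro hs hsrc hv hcl hdest
    set v := (s₀ :: s').getLast (by simp) with hvdef
    set rest := (s₀ :: s').dropLast with hrestdef
    set nghs := graph.getD v ([] : List Int) with hnghsdef
    obtain ⟨p1, p2, p3, p4, p5, p6⟩ := dfsPush_fold_props nghs visited rest
    have hvmem : v ∈ visited := hs _ (List.getLast_mem _)
    have hstackeq : rest ++ [v] = s₀ :: s' := List.dropLast_concat_getLast (by simp)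
    have hrest_stack : ∀ x ∈ rest, x ∈ (s₀ :: s') := by
      intro x hx; rw [← hstackeq]; exact List.mem_append.mpr (Or.inl hx)
    have hstack_split : ∀ x, x ∈ (s₀ :: s') → x ∈ rest ∨ x = v := by
      intro x hx; rw [← hstackeq] at hx
      rcases List.mem_append.mp hx with h | h
      · exact Or.inl h
      · rcases List.mem_cons.mp h with rfl | h'
        · exact Or.inr rfl
        · exact (List.not_mem_nil h').elim
    apply ih
    · intro x hx
      rcases p6 x hx with h | h
      · exact p1 _ (hs _ (hrest_stack _ h))
      · exact h
    · exact p1 _ hsrc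
    · intro x hx
      rcases p4 x hx with h | h
      · exact hv _ h
      · exact Relation.ReflTransGen.tail (hv _ hvmem) h
    · intro x hx hnx y hy
      have hxv : x ∈ visited := by
        rcases p5 x hx with h | h
        · exact h
        · exact absurd h hnx
      by_cases hxev : x = v
      · subst hxev; exact p3 _ hy
      · have hxnstack : x ∉ (s₀ :: s') := by
          intro hmem
          rcases hstack_split x hmem with h | h
          · exact hnx (p2 _ h)
          · exact hxev h
        exact p1 _ (hcl _ hxv hxnstack _ hy)
    · intro hd
      rcases p5 _ hd with h | h
      · have hmem := hdest h
        rcases hstack_split _ hmem with h' | h'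
        · exact p2 _ h'
        · exact absurd h'.symm hne
      · exact h

lemma A_iff (n : Int) (edges : List (List Int)) (source destination : Int) :
    (valid_path_stack n edges source destination = true ↔
      Relation.ReflTransGen (Adj edges) source destination) := by
  unfold valid_path_stack
  have hvis : PySem.Set.add PySem.Set.empty source = [source] := rfl
  rw [hvis]
  have hone : ∀ x : Int, x ∈ ([source] : List Int) ↔ x = source := by simp
  rw [dfsLoop_iff (dfsGraph edges) destination [source] [source] source
    (fun x hx => hx) ((hone source).mpr rfl)
    (by intro x hx; rw [hone] at hx; subst hx; exact Relation.ReflTransGen.refl)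
    (by intro x hx hnx; exact absurd hx hnx)
    (fun h => h)]
  constructor
  · exact Relation.ReflTransGen.mono (fun a b h => (mem_getD_dfsGraph edges a b).mp h)
  · exact Relation.ReflTransGen.mono (fun a b h => (mem_getD_dfsGraph edges a b).mpr h)

-- ---------- B side: the fixpoint reaches exactly the reachable set ----------

lemma prefix_add (s : PySem.Set Int) (x : Int) : s <+: PySem.Set.add s x := by
  rw [PySem.Set.add_eq_ite]
  split
  · exact List.prefix_refl _
  · exact List.prefix_append _ _

lemma prefix_altStep (r : PySem.Set Int) (e : List Int) : r <+: altStep r e := by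
  rcases e with _ | ⟨a, _ | ⟨b, _ | ⟨c, rest⟩⟩⟩ <;> simp only [altStep]
  · exact List.prefix_refl _
  · exact List.prefix_refl _
  · split
    · exact (prefix_add r a).trans (prefix_add _ b)
    · exact List.prefix_refl _
  · exact List.prefix_refl _

lemma prefix_altPass (edges : List (List Int)) (r : PySem.Set Int) :
    r <+: altPass edges r := by
  induction edges generalizing r with
  | nil => exact List.prefix_refl _
  | cons e es ih => exact (prefix_altStep r e).trans (ih (altStep r e))

lemma nodup_altStep (r : PySem.Set Int) (e : List Int) (h : r.Nodup) : (altStep r e).Nodup := by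
  rcases e with _ | ⟨a, _ | ⟨b, _ | ⟨c, rest⟩⟩⟩ <;> simp only [altStep]
  · exact h
  · exact h
  · split
    · exact PySem.Set.nodup_add _ _ (PySem.Set.nodup_add _ _ h)
    · exact h
  · exact h

lemma nodup_altPass (edges : List (List Int)) (r : PySem.Set Int) (h : r.Nodup) :
    (altPass edges r).Nodup := by
  induction edges generalizing r with
  | nil => exact h
  | cons e es ih => exact ih _ (nodup_altStep r e h)

lemma mem_altStep_sub (r : PySem.Set Int) (e : List Int) :
    ∀ x ∈ altStep r e,
      x ∈ r ∨ ∃ a b, e = [a, b] ∧ (a ∈ r ∨ b ∈ r) ∧ (x = a ∨ x = b) := by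
  rcases e with _ | ⟨a, _ | ⟨b, _ | ⟨c, rest⟩⟩⟩ <;> simp only [altStep]
  · exact fun x hx => Or.inl hx
  · exact fun x hx => Or.inl hx
  · split
    · rename_i hcond
      rw [Bool.or_eq_true] at hcond
      have hcond' : a ∈ r ∨ b ∈ r := by
        rcases hcond with h | h
        · exact Or.inl ((PySem.Set.contains_iff _ _).mp h)
        · exact Or.inr ((PySem.Set.contains_iff _ _).mp h)
      intro x hx
      rcases (PySem.Set.mem_add _ _ _).mp hx with h | rfl
      · rcases (PySem.Set.mem_add _ _ _).mp h with h' | rfl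
        · exact Or.inl h'
        · exact Or.inr ⟨x, b, rfl, hcond', Or.inl rfl⟩
      · exact Or.inr ⟨a, x, rfl, hcond', Or.inr rfl⟩
    · exact fun x hx => Or.inl hx
  · exact fun x hx => Or.inl hx

lemma mem_altPass_sub (edges : List (List Int)) (r : PySem.Set Int) :
    ∀ x ∈ altPass edges r, x ∈ r ∨ ∃ a b, [a, b] ∈ edges ∧ (x = a ∨ x = b) := by
  induction edges generalizing r with
  | nil => exact fun x hx => Or.inl hx
  | cons e es ih =>
    intro x hx
    rcases ih (altStep r e) x hx with h | ⟨a, b, hab, hor⟩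
    · rcases mem_altStep_sub r e x h with h' | ⟨a, b, rfl, _, hor⟩
      · exact Or.inl h'
      · exact Or.inr ⟨a, b, List.mem_cons_self, hor⟩
    · exact Or.inr ⟨a, b, List.mem_cons_of_mem _ hab, hor⟩

lemma altPass_trigger (edges : List (List Int)) (r : PySem.Set Int) (a b : Int)
    (he : [a, b] ∈ edges) (hr : a ∈ r ∨ b ∈ r) :
    a ∈ altPass edges r ∧ b ∈ altPass edges r := by
  induction edges generalizing r with
  | nil => cases he
  | cons e es ih =>
    rcases List.mem_cons.mp he with heq | hmem
    · subst heq
      have hcond : (PySem.Set.contains r a || PySem.Set.contains r b) = true := by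
        rcases hr with h | h
        · rw [(PySem.Set.contains_iff r a).mpr h]; simp
        · rw [(PySem.Set.contains_iff r b).mpr h]; simp
      have hstep : altStep r [a, b] = PySem.Set.add (PySem.Set.add r a) b := by
        simp only [altStep]; rw [if_pos hcond]
      have ha : a ∈ altStep r [a, b] := by
        rw [hstep]
        exact (PySem.Set.mem_add _ _ _).mpr (Or.inl ((PySem.Set.mem_add _ _ _).mpr (Or.inr rfl)))
      have hb : b ∈ altStep r [a, b] := by
        rw [hstep]; exact (PySem.Set.mem_add _ _ _).mpr (Or.inr rfl)
      exact ⟨(prefix_altPass es _).subset ha, (prefix_altPass es _).subset hb⟩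
    · exact ih (altStep r e) hmem
        (hr.imp ((prefix_altStep r e).subset ·) ((prefix_altStep r e).subset ·))

lemma altPass_sound (edges0 edges : List (List Int)) (src : Int) (r : PySem.Set Int)
    (hsub : ∀ e ∈ edges, e ∈ edges0)
    (hr : ∀ x ∈ r, Relation.ReflTransGen (Adj edges0) src x) :
    ∀ x ∈ altPass edges r, Relation.ReflTransGen (Adj edges0) src x := by
  induction edges generalizing r with
  | nil => exact hr
  | cons e es ih =>
    refine ih (altStep r e) (fun e' he' => hsub e' (List.mem_cons_of_mem _ he')) ?_
    intro x hx
    rcases mem_altStep_sub r e x hx with h | ⟨a, b, rfl, hcond, hor⟩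
    · exact hr x h
    · have hab : [a, b] ∈ edges0 := hsub _ List.mem_cons_self
      rcases hor with rfl | rfl
      · rcases hcond with h | h
        · exact hr _ h
        · exact Relation.ReflTransGen.tail (hr _ h) ⟨[x, b], hab, Or.inr rfl⟩
      · rcases hcond with h | h
        · exact Relation.ReflTransGen.tail (hr _ h) ⟨[a, x], hab, Or.inl rfl⟩
        · exact hr _ h

-- the node universe used only for the cardinality argument
def uNodes (edges : List (List Int)) (source : Int) : List Int :=
  source :: edges.flatMap (fun e => match e with | [a, b] => [a, b] | _ => [])

lemma length_uNodes (edges : List (List Int)) (source : Int) :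
    (uNodes edges source).length ≤ 2 * edges.length + 1 := by
  unfold uNodes
  simp only [List.length_cons]
  have : ∀ es : List (List Int),
      (es.flatMap (fun e => match e with | [a, b] => [a, b] | _ => [])).length ≤ 2 * es.length := by
    intro es
    induction es with
    | nil => simp
    | cons e es' ih =>
      rw [List.flatMap_cons, List.length_append, List.length_cons]
      have he : (match e with | [a, b] => [a, b] | _ => ([] : List Int)).length ≤ 2 := by
        match e with
        | [a, b] => simp
        | [] => simp
        | [a] => simp
        | a :: b :: c :: rest => simp
      omega
  have := this edges
  omega

lemma mem_uNodes_of_edge (edges : List (List Int)) (source a b : Int) (he : [a, b] ∈ edges) :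
    a ∈ uNodes edges source ∧ b ∈ uNodes edges source := by
  constructor <;>
  · apply List.mem_cons_of_mem
    apply List.mem_flatMap.mpr
    exact ⟨[a, b], he, by simp⟩

lemma nodup_length_le (l U : List Int) (hnd : l.Nodup) (hsub : ∀ x ∈ l, x ∈ U) :
    l.length ≤ U.length := by
  calc l.length = l.toFinset.card := (List.toFinset_card_of_nodup hnd).symm
    _ ≤ U.toFinset.card := Finset.card_le_card (fun x hx =>
        List.mem_toFinset.mpr (hsub x (List.mem_toFinset.mp hx)))
    _ ≤ U.length := List.toFinset_card_le U

lemma altLoop_stable (edges : List (List Int)) (source : Int) (k : Nat) (reach : PySem.Set Int)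
    (hnd : reach.Nodup) (hsub : ∀ x ∈ reach, x ∈ uNodes edges source)
    (hfuel : (uNodes edges source).length + 1 ≤ k + reach.length) :
    altPass edges (altLoop edges k reach) = altLoop edges k reach := by
  induction k generalizing reach with
  | zero =>
    exfalso
    have := nodup_length_le reach _ hnd hsub
    omega
  | succ k ih =>
    unfold altLoop
    split
    · rename_i hlen
      have heq : reach = altPass edges reach :=
        (prefix_altPass edges reach).eq_of_length hlen.symm
      rw [← heq]
      exact heq.symm
    · rename_i hlen
      apply ih
      · exact nodup_altPass edges reach hnd
      · intro x hx
        rcases mem_altPass_sub edges reach x hx with h | ⟨a, b, hab, hor⟩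
        · exact hsub x h
        · rcases hor with rfl | rfl
          · exact (mem_uNodes_of_edge edges source _ _ hab).1
          · exact (mem_uNodes_of_edge edges source _ _ hab).2
      · have hge : reach.length ≤ (altPass edges reach).length :=
          (prefix_altPass edges reach).length_le
        omega

lemma altLoop_prefix (edges : List (List Int)) (k : Nat) (reach : PySem.Set Int) :
    reach <+: altLoop edges k reach := by
  induction k generalizing reach with
  | zero => exact List.prefix_refl _
  | succ k ih =>
    unfold altLoop
    split
    · exact prefix_altPass edges reach
    · exact (prefix_altPass edges reach).trans (ih _)

lemma altLoop_sound (edges : List (List Int)) (src : Int) (k : Nat) (reach : PySem.Set Int)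
    (hr : ∀ x ∈ reach, Relation.ReflTransGen (Adj edges) src x) :
    ∀ x ∈ altLoop edges k reach, Relation.ReflTransGen (Adj edges) src x := by
  induction k generalizing reach with
  | zero => exact hr
  | succ k ih =>
    unfold altLoop
    split
    · exact altPass_sound edges edges src reach (fun e he => he) hr
    · exact ih _ (altPass_sound edges edges src reach (fun e he => he) hr)

lemma B_iff (n : Int) (edges : List (List Int)) (source destination : Int) :
    (valid_path_stack_alt n edges source destination = true ↔
      Relation.ReflTransGen (Adj edges) source destination) := by
  unfold valid_path_stack_alt
  have hof : PySem.Set.ofList [source] = ([source] : List Int) := rfl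
  rw [hof, PySem.Set.contains_iff]
  have hstable : altPass edges (altLoop edges (2 * edges.length + 1) [source])
      = altLoop edges (2 * edges.length + 1) [source] := by
    apply altLoop_stable edges source
    · simp
    · intro x hx
      simp only [List.mem_singleton] at hx
      subst hx
      exact List.mem_cons_self
    · have := length_uNodes edges source
      simp only [List.length_cons, List.length_nil]
      omega
  constructor
  · intro hd
    exact altLoop_sound edges source _ [source]
      (by intro x hx; simp only [List.mem_singleton] at hx; subst hx; exact .refl) _ hd
  · intro hr
    have hsrc : source ∈ altLoop edges (2 * edges.length + 1) [source] :=
      (altLoop_prefix edges _ [source]).subset List.mem_cons_self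
    induction hr with
    | refl => exact hsrc
    | tail _ hadj ihm =>
      rename_i b c _
      rcases hadj with ⟨e, he, heq | heq⟩
      · subst heq
        have := altPass_trigger edges _ b c he (Or.inl ihm)
        rw [hstable] at this
        exact this.2
      · subst heq
        have := altPass_trigger edges _ c b he (Or.inr ihm)
        rw [hstable] at this
        exact this.1

-- ===== VERDICT (by name: the statement is the Claim_ definition above) =====
theorem valid_path_stack_spec : Claim_equal_valid_path_stack := by
  intro n edges source destination _ _
  unfold Spec_valid_path_stack
  rw [Bool.eq_iff_iff, A_iff, B_iff]
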